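-- pv_equiv track=rewrite | github.com/stouff-capital/com-stouffcapital-tableau | app/routes.py | patch_ticker_marketplace
-- ===== SOURCE A (Python) =====
-- def patch_ticker_marketplace(ticker):
--     mps = {
--         "GY": "GR",
--         "JT": "JP",
--         "UN": "US",
--         "UQ": "US",
--         "UW": "US",
--         "UR": "US",
--         "UF": "US",
--         "SQ": "SM",
--         "SE": "SW",
--     }
--
--     ticker = ticker.upper()
--
--     for mp in mps:
--         ticker = ticker.replace(f' {mp} EQUITY',  f' {mps[mp]} EQUITY')
--
--     return ticker
-- ===== SOURCE B (Python) =====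
-- MPS = {
--     "GY": "GR",
--     "JT": "JP",
--     "UN": "US",
--     "UQ": "US",
--     "UW": "US",
--     "UR": "US",
--     "UF": "US",
--     "SQ": "SM",
--     "SE": "SW",
-- }
--
--
-- def patch_ticker_marketplace(ticker):
--     # One left-to-right pass over the uppercased string instead of nine
--     # sequential full-string replace() scans.
--     s = ticker.upper()
--     out = []
--     i = 0
--     n = len(s)
--     while i < n:
--         if s[i] == ' ' and s[i + 1:i + 3] in MPS and s[i + 3:i + 10] == ' EQUITY':
--             out.append(' ' + MPS[s[i + 1:i + 3]] + ' EQUITY')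
--             i += 10
--         else:
--             out.append(s[i])
--             i += 1
--     return ''.join(out)
-- ===== Notes on version B (the rewrite author's own statement) =====
-- stated objective: alternative
-- what changed: Replaces the nine sequential full-string str.replace passes with a single left-to-right scan that at each position checks for a space, a known two-letter marketplace code, and the EQUITY suffix, substituting the mapped code via one dict lookup.
import Mathlib
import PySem

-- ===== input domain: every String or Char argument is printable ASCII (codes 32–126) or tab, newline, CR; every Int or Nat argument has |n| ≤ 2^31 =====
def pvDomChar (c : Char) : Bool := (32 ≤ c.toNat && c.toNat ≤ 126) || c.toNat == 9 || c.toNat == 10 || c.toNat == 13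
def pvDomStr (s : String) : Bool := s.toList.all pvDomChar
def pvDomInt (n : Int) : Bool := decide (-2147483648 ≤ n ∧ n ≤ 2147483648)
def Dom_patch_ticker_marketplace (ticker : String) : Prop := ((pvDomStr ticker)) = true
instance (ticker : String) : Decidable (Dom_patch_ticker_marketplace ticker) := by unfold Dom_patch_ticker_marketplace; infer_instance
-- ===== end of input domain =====

-- B replaces A's nine sequential full-string str.replace passes by one left-to-right
-- scan with a table lookup (objective: alternative; same asymptotic cost).

-- ===== PORT A =====
-- the dict mps, as its items in insertion order (iteration order of `for mp in mps`;
-- `mps[mp]` is kv.2 since the keys are distinct)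
def pvMps : List (String × String) :=
  [("GY", "GR"), ("JT", "JP"), ("UN", "US"), ("UQ", "US"), ("UW", "US"),
   ("UR", "US"), ("UF", "US"), ("SQ", "SM"), ("SE", "SW")]

-- ticker = ticker.upper(); for mp in mps: ticker = ticker.replace(f' {mp} EQUITY', f' {mps[mp]} EQUITY')
def patch_ticker_marketplace (ticker : String) : String :=
  let t := PySem.Str.upper ticker
  pvMps.foldl (fun t kv => PySem.Str.replace t (" " ++ kv.1 ++ " EQUITY") (" " ++ kv.2 ++ " EQUITY")) t

-- ===== PORT B =====
-- `s[i+1:i+3] in MPS` / `MPS[s[i+1:i+3]]`, specialised to the two looked-up characters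
def pvVal (a b : Char) : Option (Char × Char) :=
  if a = 'G' && b = 'Y' then some ('G', 'R')
  else if a = 'J' && b = 'T' then some ('J', 'P')
  else if a = 'U' && b = 'N' then some ('U', 'S')
  else if a = 'U' && b = 'Q' then some ('U', 'S')
  else if a = 'U' && b = 'W' then some ('U', 'S')
  else if a = 'U' && b = 'R' then some ('U', 'S')
  else if a = 'U' && b = 'F' then some ('U', 'S')
  else if a = 'S' && b = 'Q' then some ('S', 'M')
  else if a = 'S' && b = 'E' then some ('S', 'W')
  else none

-- Source B's while loop over s: emit ' <val> EQUITY' and advance 10 on a match, else copy one char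
def pvScan : List Char → List Char
  | ' ' :: a :: b :: ' ' :: 'E' :: 'Q' :: 'U' :: 'I' :: 'T' :: 'Y' :: rest =>
    match pvVal a b with
    | some (x, y) => ' ' :: x :: y :: ' ' :: 'E' :: 'Q' :: 'U' :: 'I' :: 'T' :: 'Y' :: pvScan rest
    | none => ' ' :: pvScan (a :: b :: ' ' :: 'E' :: 'Q' :: 'U' :: 'I' :: 'T' :: 'Y' :: rest)
  | c :: rest => c :: pvScan rest
  | [] => []

def patch_ticker_marketplace_alt (ticker : String) : String :=
  String.ofList (pvScan (PySem.Str.upper ticker).toList)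

-- ===== PRECONDITION & SPEC =====
def Spec_patch_ticker_marketplace (ticker : String) (out : String) : Prop := out = patch_ticker_marketplace_alt ticker
instance (ticker : String) (out : String) : Decidable (Spec_patch_ticker_marketplace ticker out) := by unfold Spec_patch_ticker_marketplace; infer_instance

-- ===== CLAIM (what is proved, stated in full; the proofs are below) =====
def Claim_equal_patch_ticker_marketplace : Prop := ∀ (ticker : String), Dom_patch_ticker_marketplace ticker → Spec_patch_ticker_marketplace ticker (patch_ticker_marketplace ticker)

-- ===== LEMMAS AND PROOFS =====

def pvPat (kv : Char × Char) : List Char :=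
  ' ' :: kv.1 :: kv.2 :: ' ' :: 'E' :: 'Q' :: 'U' :: 'I' :: 'T' :: 'Y' :: []

def pvPairs : List ((Char × Char) × (Char × Char)) :=
  [(('G','Y'),('G','R')), (('J','T'),('J','P')), (('U','N'),('U','S')),
   (('U','Q'),('U','S')), (('U','W'),('U','S')), (('U','R'),('U','S')),
   (('U','F'),('U','S')), (('S','Q'),('S','M')), (('S','E'),('S','W'))]

def pvRep (old new : List Char) : List Char → List Char
  | [] => []
  | c :: t =>
    if old.isPrefixOf (c :: t) then new ++ pvRep old new (t.drop (old.length - 1))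
    else c :: pvRep old new t
termination_by l => l.length
decreasing_by
  · simpa using Nat.lt_succ_of_le (List.length_drop _ ▸ Nat.sub_le _ _)
  · simp

theorem pvRep_nil (p r : List Char) : pvRep p r [] = [] := by rw [pvRep]

theorem pvRep_cons (p r : List Char) (c : Char) (t : List Char) :
    pvRep p r (c :: t) =
      if p.isPrefixOf (c :: t) then r ++ pvRep p r (t.drop (p.length - 1))
      else c :: pvRep p r t := by
  rw [pvRep]

theorem pv_not_prefix_of_mismatch (p w t : List Char) (m : Nat)
    (hm : m < p.length) (hmw : m < w.length) (hne : p.getD m ' ' ≠ w.getD m ' ') :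
    p.isPrefixOf (w ++ t) = false := by
  rw [Bool.eq_false_iff]
  intro hpre
  obtain ⟨s, hs⟩ := List.isPrefixOf_iff_prefix.mp hpre
  apply hne
  have h1 : (p ++ s).getD m ' ' = p.getD m ' ' := by
    simp [List.getD_eq_getElem?_getD, List.getElem?_append_left hm]
  have h2 : (w ++ t).getD m ' ' = w.getD m ' ' := by
    simp [List.getD_eq_getElem?_getD, List.getElem?_append_left hmw]
  rw [← h1, hs, h2]

def pvNoHitB (p w : List Char) : Bool :=
  (List.range w.length).all fun n =>
    (List.range (min p.length (w.length - n))).any fun m => !(p.getD m ' ' == w.getD (n + m) ' ')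

def pvHeadMismB (x w : List Char) : Bool :=
  x.isEmpty || (List.range (min x.length w.length)).any fun m => !(x.getD m ' ' == w.getD m ' ')

theorem pv_not_prefix_of_headMism (x w t : List Char) (hx : x ≠ [])
    (h : pvHeadMismB x w = true) : x.isPrefixOf (w ++ t) = false := by
  simp only [pvHeadMismB, Bool.or_eq_true, List.isEmpty_iff, List.any_eq_true,
    List.mem_range] at h
  rcases h with h | ⟨m, hm, hne⟩
  · exact absurd h hx
  · exact pv_not_prefix_of_mismatch x w t m (lt_of_lt_of_le hm (min_le_left _ _))
      (lt_of_lt_of_le hm (min_le_right _ _)) (by simpa using hne)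

theorem pvRep_prepend (p r w : List Char) (h : pvNoHitB p w = true) :
    ∀ t, pvRep p r (w ++ t) = w ++ pvRep p r t := by
  induction w with
  | nil => intro t; simp
  | cons c w' ih =>
    intro t
    have h0 : p.isPrefixOf (c :: (w' ++ t)) = false := by
      simp only [pvNoHitB, List.all_eq_true, List.mem_range] at h
      have := h 0 (by simp)
      simp only [List.any_eq_true, List.mem_range] at this
      obtain ⟨m, hm, hne⟩ := this
      exact pv_not_prefix_of_mismatch p (c :: w') t m
        (lt_of_lt_of_le hm (min_le_left _ _))
        (by have := lt_of_lt_of_le hm (min_le_right _ _); omega)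
        (by simpa using hne)
    have h' : pvNoHitB p w' = true := by
      simp only [pvNoHitB, List.all_eq_true, List.mem_range, List.any_eq_true] at h ⊢
      intro n hn
      obtain ⟨m, hm, hne⟩ := h (n + 1) (by simpa using Nat.succ_lt_succ hn)
      refine ⟨m, by simp only [List.mem_range, List.length_cons] at hm ⊢; omega, ?_⟩
      · simpa [show n + 1 + m = (n + m) + 1 by omega] using hne
    rw [List.cons_append, pvRep_cons, h0]
    simp only [Bool.false_eq_true, if_false]
    rw [ih h' t]; simp

theorem pvRep_self (p r : List Char) (hp : p ≠ []) (t : List Char) :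
    pvRep p r (p ++ t) = r ++ pvRep p r t := by
  cases p with
  | nil => exact absurd rfl hp
  | cons c p' =>
    have htrue : (c :: p').isPrefixOf ((c :: p') ++ t) = true :=
      List.isPrefixOf_iff_prefix.mpr (List.prefix_append _ _)
    rw [List.cons_append, pvRep_cons]
    rw [show (c :: p').isPrefixOf (c :: (p' ++ t)) = true from htrue]
    simp [List.drop_left]

theorem pvRep_pres (p r : List Char) (X : List (List Char))
    (hX1 : ∀ x ∈ X, x ≠ [] → pvHeadMismB x p = true ∧ pvHeadMismB x r = true)
    (hX2 : ∀ x ∈ X, x.tail ∈ X) :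
    ∀ u x, x ∈ X → x.isPrefixOf (pvRep p r u) = x.isPrefixOf u := by
  intro u
  induction u with
  | nil => intro x hx; rw [pvRep_nil]
  | cons c w ih =>
    intro x hx
    rw [pvRep_cons]
    cases hp0 : p.isPrefixOf (c :: w) with
    | false =>
      simp only [Bool.false_eq_true, if_false]
      cases x with
      | nil => simp [List.isPrefixOf]
      | cons d x' =>
        simp only [List.isPrefixOf]
        rw [ih x' (by simpa using hX2 _ hx)]
    | true =>
      simp only [if_true]
      cases x with
      | nil => simp [List.isPrefixOf]
      | cons d x' =>
        obtain ⟨hmp, hmr⟩ := hX1 _ hx (by simp)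
        obtain ⟨s, hs⟩ := List.isPrefixOf_iff_prefix.mp hp0
        rw [pv_not_prefix_of_headMism (d :: x') r _ (by simp) hmr, ← hs,
          pv_not_prefix_of_headMism (d :: x') p s (by simp) hmp]

theorem pv_go_eq (old new : List Char) (hold : old ≠ []) :
    ∀ fuel l acc, l.length ≤ fuel →
      PySem.Chars.replace.go old new fuel l acc = acc.reverse ++ pvRep old new l := by
  intro fuel
  induction fuel with
  | zero =>
    intro l acc hl
    have hnil : l = [] := List.eq_nil_of_length_eq_zero (Nat.le_zero.mp hl)
    subst hnil
    rw [PySem.Chars.replace.go.eq_1, pvRep_nil]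
  | succ f ih =>
    intro l acc hl
    cases l with
    | nil =>
      rw [PySem.Chars.replace.go.eq_2 old new (f + 1) acc (by omega), pvRep_nil]
      simp
    | cons c t =>
      rw [PySem.Chars.replace.go.eq_3]
      cases hpre : old.isPrefixOf (c :: t) with
      | false =>
        simp only [Bool.false_eq_true, if_false]
        rw [ih t (c :: acc) (by simpa using Nat.lt_succ_iff.mp (by simpa using hl)),
          pvRep_cons, hpre]
        simp
      | true =>
        simp only [if_true]
        obtain ⟨o, os, rfl⟩ : ∃ o os, old = o :: os := by
          cases old with
          | nil => exact absurd rfl hold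
          | cons o os => exact ⟨o, os, rfl⟩
        have hlen : (List.drop (o :: os).length (c :: t)).length ≤ f := by
          simp only [List.length_drop, List.length_cons] at *
          omega
        rw [ih _ (new.reverse ++ acc) hlen, pvRep_cons, hpre]
        simp [List.drop_succ_cons]

theorem pv_replace_eq_pvRep (s old new : List Char) (h : old ≠ []) :
    PySem.Chars.replace s old new = pvRep old new s := by
  unfold PySem.Chars.replace
  rw [if_neg (by simpa using h)]
  simpa using pv_go_eq old new h s.length s [] le_rfl

def pvStep (l : List Char) (kv : (Char × Char) × (Char × Char)) : List Char :=
  pvRep (pvPat kv.1) (pvPat kv.2) l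

def pvChain (l : List Char) : List Char := pvPairs.foldl pvStep l

theorem pvX_tail : ∀ kv ∈ pvPairs, ∀ x ∈ (pvPat kv.1).tails, x.tail ∈ (pvPat kv.1).tails := by decide

theorem pvX_mem : ∀ kv ∈ pvPairs, pvPat kv.1 ∈ (pvPat kv.1).tails := by decide

theorem pvX_mism : ∀ kv ∈ pvPairs, ∀ kv' ∈ pvPairs, kv' ≠ kv → ∀ x ∈ (pvPat kv'.1).tails, x ≠ [] →
    pvHeadMismB x (pvPat kv.1) = true ∧ pvHeadMismB x (pvPat kv.2) = true := by decide

theorem pv_noHit_keys : ∀ kv ∈ pvPairs, ∀ kv' ∈ pvPairs, kv' ≠ kv →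
    pvNoHitB (pvPat kv'.1) (pvPat kv.1) = true := by decide

theorem pv_noHit_vals : ∀ kv ∈ pvPairs, ∀ kv' ∈ pvPairs,
    pvNoHitB (pvPat kv'.1) (pvPat kv.2) = true := by decide

theorem pvPairs_nodup : pvPairs.Nodup := by decide

theorem pv_foldl_prepend (P : List ((Char × Char) × (Char × Char))) (w : List Char)
    (hw : ∀ kv ∈ P, pvNoHitB (pvPat kv.1) w = true) :
    ∀ t, P.foldl pvStep (w ++ t) = w ++ P.foldl pvStep t := by
  induction P generalizing w with
  | nil => intro t; simp
  | cons kv P' ih =>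
    intro t
    simp only [List.foldl_cons]
    rw [show pvStep (w ++ t) kv = w ++ pvStep t kv from
      pvRep_prepend _ _ w (hw kv (by simp)) t]
    exact ih w (fun kv' h' => hw kv' (by simp [h'])) _

theorem pv_foldl_skip (P : List ((Char × Char) × (Char × Char)))
    (hsub : ∀ kv ∈ P, kv ∈ pvPairs) (hnd : P.Nodup) (c : Char) :
    ∀ t, (∀ kv ∈ P, (pvPat kv.1).isPrefixOf (c :: t) = false) →
    P.foldl pvStep (c :: t) = c :: P.foldl pvStep t := by
  induction P with
  | nil => intro t _; simp
  | cons kv P' ih =>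
    intro t h
    simp only [List.foldl_cons]
    have hstep : pvStep (c :: t) kv = c :: pvStep t kv := by
      unfold pvStep
      rw [pvRep_cons, h kv (by simp)]
      simp
    rw [hstep]
    apply ih (fun kv' h' => hsub kv' (by simp [h'])) (List.Nodup.of_cons hnd)
    intro kv' h'
    have hne : kv' ≠ kv := by
      rintro rfl
      exact (List.nodup_cons.mp hnd).1 h'
    have hpres := pvRep_pres (pvPat kv.1) (pvPat kv.2) (pvPat kv'.1).tails
      (fun x hx hxe => pvX_mism kv (hsub kv (by simp)) kv' (hsub kv' (by simp [h'])) hne x hx hxe)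
      (pvX_tail kv' (hsub kv' (by simp [h'])))
      (c :: t) (pvPat kv'.1) (pvX_mem kv' (hsub kv' (by simp [h'])))
    have : (pvPat kv'.1).isPrefixOf (pvRep (pvPat kv.1) (pvPat kv.2) (c :: t)) = false := by
      rw [hpres]; exact h kv' (by simp [h'])
    rw [show c :: pvStep t kv = pvRep (pvPat kv.1) (pvPat kv.2) (c :: t) from by
      unfold pvStep; rw [pvRep_cons, h kv (by simp)]; simp]
    exact this

theorem pvChain_hit (kv : (Char × Char) × (Char × Char)) (hkv : kv ∈ pvPairs) (t : List Char) :
    pvChain (pvPat kv.1 ++ t) = pvPat kv.2 ++ pvChain t := by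
  obtain ⟨pre, post, hsplit⟩ := List.append_of_mem hkv
  have hnd : (pre ++ kv :: post).Nodup := hsplit ▸ pvPairs_nodup
  obtain ⟨hndpre, hndpost, hdisj⟩ := List.nodup_append.mp hnd
  have hpre_mem : ∀ kv' ∈ pre, kv' ∈ pvPairs := fun kv' h' => hsplit ▸ List.mem_append_left _ h'
  have hpost_mem : ∀ kv' ∈ post, kv' ∈ pvPairs := fun kv' h' =>
    hsplit ▸ List.mem_append_right _ (List.mem_cons_of_mem _ h')
  have hpre_ne : ∀ kv' ∈ pre, kv' ≠ kv := by
    intro kv' h' rfl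
    exact hdisj kv' h' kv' (by simp) rfl
  unfold pvChain
  rw [hsplit, List.foldl_append, List.foldl_append, List.foldl_cons, List.foldl_cons]
  rw [pv_foldl_prepend pre (pvPat kv.1)
    (fun kv' h' => pv_noHit_keys kv hkv kv' (hpre_mem kv' h') (hpre_ne kv' h')) t]
  rw [show pvStep (pvPat kv.1 ++ List.foldl pvStep t pre) kv
      = pvPat kv.2 ++ pvStep (List.foldl pvStep t pre) kv from
    pvRep_self _ _ (by simp [pvPat]) _]
  rw [pv_foldl_prepend post (pvPat kv.2)
    (fun kv' h' => pv_noHit_vals kv hkv kv' (hpost_mem kv' h'))]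

theorem pvChain_skip (c : Char) (t : List Char)
    (h : ∀ kv ∈ pvPairs, (pvPat kv.1).isPrefixOf (c :: t) = false) :
    pvChain (c :: t) = c :: pvChain t :=
  pv_foldl_skip pvPairs (fun _ h => h) pvPairs_nodup c t h

theorem pvScan_hit : ∀ kv ∈ pvPairs, ∀ rest : List Char,
    pvScan (pvPat kv.1 ++ rest) = pvPat kv.2 ++ pvScan rest := by
  intro kv hkv
  fin_cases hkv <;> (intro rest; rfl)

theorem pvScan_skip (c : Char) (t : List Char)
    (h : ∀ kv ∈ pvPairs, (pvPat kv.1).isPrefixOf (c :: t) = false) :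
    pvScan (c :: t) = c :: pvScan t := by
  rw [pvScan.eq_def]
  split
  · rename_i a b rest heq
    cases hv : pvVal a b with
    | none =>
      injection heq with h1 h2
      subst h1; subst h2
      simp
    | some v =>
      obtain ⟨x, y⟩ := v
      exfalso
      obtain ⟨rfl, rfl⟩ : c = ' ' ∧ t = a :: b :: ' ' :: 'E' :: 'Q' :: 'U' :: 'I' :: 'T' :: 'Y' :: rest := by
        injection heq with h1 h2; exact ⟨h1, h2⟩
      simp only [pvVal] at hv
      split_ifs at hv with h1 h2 h3 h4 h5 h6 h7 h8 h9 <;>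
        simp_all [pvPat, List.isPrefixOf, pvPairs]
  · rename_i heq
    injection heq with h1 h2
    subst h1; subst h2
    rfl
  · rename_i heq
    simp at heq

theorem pvChain_nil : pvChain [] = [] := by
  simp [pvChain, pvPairs, List.foldl, pvStep, pvRep_nil]

theorem pvChain_eq_pvScan : ∀ l : List Char, pvChain l = pvScan l := by
  have aux : ∀ n : Nat, ∀ l : List Char, l.length ≤ n → pvChain l = pvScan l := by
    intro n
    induction n with
    | zero =>
      intro l hl
      have : l = [] := List.eq_nil_of_length_eq_zero (Nat.le_zero.mp hl)
      subst this
      rw [pvChain_nil]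
      rfl
    | succ n ih =>
      intro l hl
      cases l with
      | nil => rw [pvChain_nil]; rfl
      | cons c t =>
        by_cases hhit : ∃ kv ∈ pvPairs, (pvPat kv.1).isPrefixOf (c :: t) = true
        · obtain ⟨kv, hkv, hpref⟩ := hhit
          obtain ⟨rest, hrest⟩ := List.isPrefixOf_iff_prefix.mp hpref
          rw [← hrest, pvChain_hit kv hkv, pvScan_hit kv hkv]
          have hlen : rest.length ≤ n := by
            have := congrArg List.length hrest
            simp only [List.length_append, List.length_cons] at this hl
            simp only [pvPat, List.length_cons, List.length_nil] at this
            omega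
          rw [ih rest hlen]
        · have h' : ∀ kv ∈ pvPairs, (pvPat kv.1).isPrefixOf (c :: t) = false := by
            intro kv hkv
            rw [Bool.eq_false_iff]
            exact fun hc => hhit ⟨kv, hkv, hc⟩
          have hlen : t.length ≤ n := by simp only [List.length_cons] at hl; omega
          rw [pvChain_skip c t h', pvScan_skip c t h', ih t hlen]
  exact fun l => aux l.length l le_rfl

theorem pv_replace_pat (s : List Char) (k v : Char × Char) :
    PySem.Chars.replace s (pvPat k) (pvPat v) = pvRep (pvPat k) (pvPat v) s :=
  pv_replace_eq_pvRep s _ _ (by simp [pvPat])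

theorem pv_portA_eq (ticker : String) :
    patch_ticker_marketplace ticker = String.ofList (pvChain (PySem.Chars.upper ticker.toList)) := by
  unfold patch_ticker_marketplace pvMps pvChain pvPairs
  simp only [List.foldl, pvStep, PySem.Str.replace, String.toList_ofList,
    show (" " ++ "GY" ++ " EQUITY" : String).toList = pvPat ('G','Y') from rfl,
    show (" " ++ "GR" ++ " EQUITY" : String).toList = pvPat ('G','R') from rfl,
    show (" " ++ "JT" ++ " EQUITY" : String).toList = pvPat ('J','T') from rfl,
    show (" " ++ "JP" ++ " EQUITY" : String).toList = pvPat ('J','P') from rfl,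
    show (" " ++ "UN" ++ " EQUITY" : String).toList = pvPat ('U','N') from rfl,
    show (" " ++ "UQ" ++ " EQUITY" : String).toList = pvPat ('U','Q') from rfl,
    show (" " ++ "UW" ++ " EQUITY" : String).toList = pvPat ('U','W') from rfl,
    show (" " ++ "UR" ++ " EQUITY" : String).toList = pvPat ('U','R') from rfl,
    show (" " ++ "UF" ++ " EQUITY" : String).toList = pvPat ('U','F') from rfl,
    show (" " ++ "US" ++ " EQUITY" : String).toList = pvPat ('U','S') from rfl,
    show (" " ++ "SQ" ++ " EQUITY" : String).toList = pvPat ('S','Q') from rfl,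
    show (" " ++ "SM" ++ " EQUITY" : String).toList = pvPat ('S','M') from rfl,
    show (" " ++ "SE" ++ " EQUITY" : String).toList = pvPat ('S','E') from rfl,
    show (" " ++ "SW" ++ " EQUITY" : String).toList = pvPat ('S','W') from rfl,
    pv_replace_pat, PySem.Str.toList_upper]

-- ===== VERDICT (by name: the statement is the Claim_ definition above) =====
theorem patch_ticker_marketplace_spec : Claim_equal_patch_ticker_marketplace := by
  intro ticker _
  unfold Spec_patch_ticker_marketplace patch_ticker_marketplace_alt
  rw [pv_portA_eq, pvChain_eq_pvScan, PySem.Str.toList_upper]
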